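-- pv_equiv track=rewrite | github.com/TongQM/spatio-temporal-batching | lib/baselines/carlsson.py | _find_decomposition
-- ===== SOURCE A (Python) =====
-- from typing import Callable, Dict, List, Tuple
--
-- def _find_decomposition(signs: List[int], m: int) -> Tuple[int, ...]:
--     """Return pair (i*, j*) or triple (i*, j*, k*)."""
--     for i in range(1, m):
--         j = m - i
--         if 1 <= j <= m - 1 and (signs[i - 1] == 0
--                                 or signs[i - 1] == signs[j - 1]):
--             return (i, j)
--     for i in range(1, m - 1):
--         for j in range(1, m - i):
--             k = m - i - j
--             if 1 <= k <= m - 1 and signs[i-1] == signs[j-1] == signs[k-1]: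
--                 return (i, j, k)
--     q, r = divmod(m, 3)
--     return tuple(q + (1 if i < r else 0) for i in range(3))
-- ===== SOURCE B (Python) =====
-- def _find_decomposition(signs, m):
--     """Return pair (i*, j*) or triple (i*, j*, k*)."""
--     for i in range(1, m):
--         if signs[i - 1] == 0 or signs[i - 1] == signs[m - i - 1]:
--             return (i, m - i)
--     pos = {}
--     members = {}
--     for p in range(1, m):
--         s = signs[p - 1]
--         pos.setdefault(s, []).append(p)
--         members.setdefault(s, set()).add(p)
--     for i in range(1, m - 1):
--         s = signs[i - 1]
--         for j in pos[s]:
--             if j <= m - i - 1 and (m - i - j) in members[s]: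
--                 return (i, j, m - i - j)
--     q, r = divmod(m, 3)
--     return (q + (1 if 0 < r else 0), q + (1 if 1 < r else 0), q + (1 if 2 < r else 0))
-- ===== Notes on version B (the rewrite author's own statement) =====
-- stated objective: alternative
-- what changed: B drops A's redundant pair-bound test and replaces A's nested scan over all j by a single grouping pass (per-sign ordered position list plus position set), so the triple search iterates only same-sign positions and tests k by set membership.
-- outside the precondition, e.g. on _find_decomposition([0], 5): A returns (1, 4), B returns (1, 4)
import Mathlib
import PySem

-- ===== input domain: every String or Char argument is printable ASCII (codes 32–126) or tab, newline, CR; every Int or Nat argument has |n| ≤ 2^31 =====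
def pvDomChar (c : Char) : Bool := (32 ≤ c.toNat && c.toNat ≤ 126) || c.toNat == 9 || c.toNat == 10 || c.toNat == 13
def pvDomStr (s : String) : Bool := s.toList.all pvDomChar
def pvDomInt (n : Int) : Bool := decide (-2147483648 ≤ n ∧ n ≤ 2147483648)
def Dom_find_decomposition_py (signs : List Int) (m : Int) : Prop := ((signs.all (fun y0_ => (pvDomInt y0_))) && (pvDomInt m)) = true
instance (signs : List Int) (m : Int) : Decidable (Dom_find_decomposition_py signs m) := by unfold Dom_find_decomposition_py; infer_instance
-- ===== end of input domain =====

-- B replaces A's quadratic inner scan over all j by a one-pass grouping of the positions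
-- 1..m-1 by sign (ordered list + set per sign): the triple search then iterates only the
-- same-sign positions and tests k by set membership; A's redundant pair-bound check is dropped.
-- Structurally different ('alternative'); no speed claim.

-- shared loop combinators: a Python 'for v in range(i, hi)' with early return / with an accumulator
def pvLoop {β : Type} (f : Int → Option β) (hi i : Int) : Option β :=
  if _h : i < hi then
    match f i with
    | some r => some r
    | none => pvLoop f hi (i + 1)
  else none
termination_by (hi - i).toNat
decreasing_by omega

def pvFoldLoop {σ : Type} (g : σ → Int → σ) (hi i : Int) (acc : σ) : σ :=
  if i < hi then pvFoldLoop g hi (i + 1) (g acc i) else acc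
termination_by (hi - i).toNat
decreasing_by omega

-- ===== PORT A =====
-- first loop of A: first i in range(1, m) passing the pair test (early return)
def pvA_pair (signs : List Int) (m : Int) : Option (List Int) :=
  pvLoop (fun i =>
    if (1 ≤ m - i ∧ m - i ≤ m - 1) ∧ (PySem.List.pyGetD signs (i - 1) 0 = 0 ∨
        PySem.List.pyGetD signs (i - 1) 0 = PySem.List.pyGetD signs (m - i - 1) 0)
    then some [i, m - i] else none) m 1

-- second (nested) loop of A
def pvA_triple (signs : List Int) (m : Int) : Option (List Int) :=
  pvLoop (fun i =>
    pvLoop (fun j =>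
      if (1 ≤ m - i - j ∧ m - i - j ≤ m - 1) ∧
          PySem.List.pyGetD signs (i - 1) 0 = PySem.List.pyGetD signs (j - 1) 0 ∧
          PySem.List.pyGetD signs (j - 1) 0 = PySem.List.pyGetD signs (m - i - j - 1) 0
      then some [i, j, m - i - j] else none) (m - i) 1) (m - 1) 1

def find_decomposition_py (signs : List Int) (m : Int) : List Int :=
  match pvA_pair signs m with
  | some t => t
  | none =>
    match pvA_triple signs m with
    | some t => t
    | none =>
      let q := PySem.Int.floordiv m 3
      let r := PySem.Int.mod m 3
      [q + (if (0 : Int) < r then 1 else 0), q + (if (1 : Int) < r then 1 else 0),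
       q + (if (2 : Int) < r then 1 else 0)]

-- ===== PORT B =====
-- first loop of B (no redundant bound test)
def pvB_pair (signs : List Int) (m : Int) : Option (List Int) :=
  pvLoop (fun i =>
    if PySem.List.pyGetD signs (i - 1) 0 = 0 ∨
        PySem.List.pyGetD signs (i - 1) 0 = PySem.List.pyGetD signs (m - i - 1) 0
    then some [i, m - i] else none) m 1

-- the single grouping pass of B: pos (sign ↦ ordered position list) and members (sign ↦ position set)
def pvB_tables (signs : List Int) (m : Int) :
    PySem.Dict Int (List Int) × PySem.Dict Int (PySem.Set Int) :=
  pvFoldLoop (fun dd p =>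
    (dd.1.modify (PySem.List.pyGetD signs (p - 1) 0) [] (fun l => l ++ [p]),
     dd.2.modify (PySem.List.pyGetD signs (p - 1) 0) [] (fun st => PySem.Set.add st p)))
    m 1 (PySem.Dict.empty, PySem.Dict.empty)

-- second loop of B: scan only the same-sign positions, test k by set membership
def pvB_triple (signs : List Int) (m : Int) : Option (List Int) :=
  pvLoop (fun i =>
    ((pvB_tables signs m).1.getD (PySem.List.pyGetD signs (i - 1) 0) []).findSome? (fun j =>
      if j ≤ m - i - 1 ∧ PySem.Set.contains
          ((pvB_tables signs m).2.getD (PySem.List.pyGetD signs (i - 1) 0) []) (m - i - j) = true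
      then some [i, j, m - i - j] else none)) (m - 1) 1

def find_decomposition_py_alt (signs : List Int) (m : Int) : List Int :=
  match pvB_pair signs m with
  | some t => t
  | none =>
    match pvB_triple signs m with
    | some t => t
    | none =>
      let q := PySem.Int.floordiv m 3
      let r := PySem.Int.mod m 3
      [q + (if (0 : Int) < r then 1 else 0), q + (if (1 : Int) < r then 1 else 0),
       q + (if (2 : Int) < r then 1 else 0)]

-- ===== PRECONDITION & SPEC =====
-- Pre_ excludes inputs with fewer than m-1 sign entries: the Python A (and B) read signs[0..m-2]
-- and generally raise IndexError there (on a few such inputs A still returns early through the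
-- zero-sign shortcut before reaching an out-of-range index — those are excluded with it).
def Pre_find_decomposition_py (signs : List Int) (m : Int) : Prop := m ≤ (signs.length : Int) + 1
instance (signs : List Int) (m : Int) : Decidable (Pre_find_decomposition_py signs m) := by
  unfold Pre_find_decomposition_py; infer_instance

def pvWitness_find_decomposition_py : List Int × Int := ([1, 1, -1, -1], 5)

def Spec_find_decomposition_py (signs : List Int) (m : Int) (out : List Int) : Prop :=
  out = find_decomposition_py_alt signs m
instance (signs : List Int) (m : Int) (out : List Int) :
    Decidable (Spec_find_decomposition_py signs m out) := by
  unfold Spec_find_decomposition_py; infer_instance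

-- ===== CLAIM (what is proved, stated in full; the proofs are below) =====
def Claim_equal_find_decomposition_py : Prop := ∀ (signs : List Int) (m : Int),
  Dom_find_decomposition_py signs m → Pre_find_decomposition_py signs m →
  Spec_find_decomposition_py signs m (find_decomposition_py signs m)

-- ===== LEMMAS AND PROOFS =====

theorem pvLoop_eq {β : Type} (f : Int → Option β) (hi i : Int) :
    pvLoop f hi i = (PySem.List.pyRange i hi 1).findSome? f := by
  have H : ∀ (n : Nat) (i : Int), (hi - i).toNat = n →
      pvLoop f hi i = (PySem.List.pyRange i hi 1).findSome? f := by
    intro n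
    induction n with
    | zero =>
      intro i h0
      rw [pvLoop, dif_neg (by omega), PySem.List.pyRange_one_eq_nil (by omega)]
      rfl
    | succ n ih =>
      intro i hn
      have h : i < hi := by omega
      rw [pvLoop, dif_pos h, PySem.List.pyRange_one_cons h, List.findSome?_cons,
        ih (i + 1) (by omega)]
      cases f i <;> rfl
  exact H _ i rfl

theorem pvFoldLoop_eq {σ : Type} (g : σ → Int → σ) (hi i : Int) (acc : σ) :
    pvFoldLoop g hi i acc = (PySem.List.pyRange i hi 1).foldl g acc := by
  have H : ∀ (n : Nat) (i : Int) (acc : σ), (hi - i).toNat = n →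
      pvFoldLoop g hi i acc = (PySem.List.pyRange i hi 1).foldl g acc := by
    intro n
    induction n with
    | zero =>
      intro i acc h0
      rw [pvFoldLoop, if_neg (show ¬ i < hi by omega), PySem.List.pyRange_one_eq_nil (by omega)]
      rfl
    | succ n ih =>
      intro i acc hn
      have h : i < hi := by omega
      rw [pvFoldLoop, if_pos h, PySem.List.pyRange_one_cons h, List.foldl_cons,
        ih (i + 1) _ (by omega)]
  exact H _ i acc rfl

theorem pv_findSome?_congr {α β : Type} (l : List α) (f g : α → Option β)
    (h : ∀ x ∈ l, f x = g x) : l.findSome? f = l.findSome? g := by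
  induction l with
  | nil => rfl
  | cons a t ih =>
    simp only [List.findSome?_cons, h a (List.mem_cons_self)]
    cases g a with
    | some b => rfl
    | none => exact ih (fun x hx => h x (List.mem_cons_of_mem _ hx))

theorem pv_findSome?_filter {α β : Type} (l : List α) (p : α → Bool) (f : α → Option β) :
    (l.filter p).findSome? f = l.findSome? (fun x => if p x then f x else none) := by
  induction l with
  | nil => rfl
  | cons a t ih =>
    by_cases hp : p a
    · rw [List.filter_cons, if_pos hp, List.findSome?_cons, List.findSome?_cons]
      simp only [hp, if_true]
      cases hfa : f a <;> simp [ih]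
    · rw [List.filter_cons, if_neg hp, ih, List.findSome?_cons]
      simp [hp]

theorem pv_pair_eq (signs : List Int) (m : Int) : pvA_pair signs m = pvB_pair signs m := by
  unfold pvA_pair pvB_pair
  rw [pvLoop_eq, pvLoop_eq]
  apply pv_findSome?_congr
  intro i hi
  rw [PySem.List.mem_pyRange_one] at hi
  have h1 : (1 ≤ m - i ∧ m - i ≤ m - 1) = True := by simp; omega
  simp only [h1, true_and]

-- the fold building both dicts at once is the pair of the two separate folds
theorem pv_foldl_pair {α β γ : Type} (l : List α) (f1 : β → α → β) (f2 : γ → α → γ)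
    (b : β) (c : γ) :
    l.foldl (fun dd p => (f1 dd.1 p, f2 dd.2 p)) (b, c) = (l.foldl f1 b, l.foldl f2 c) := by
  induction l generalizing b c with
  | nil => rfl
  | cons a t ih => simp [List.foldl_cons, ih]

theorem pvB_tables_eq (signs : List Int) (m : Int) :
    pvB_tables signs m =
      ((PySem.List.pyRange 1 m 1).foldl
        (fun d p => d.modify (PySem.List.pyGetD signs (p - 1) 0) [] (fun l => l ++ [p]))
        PySem.Dict.empty,
       (PySem.List.pyRange 1 m 1).foldl
        (fun d p => d.modify (PySem.List.pyGetD signs (p - 1) 0) [] (fun st => PySem.Set.add st p))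
        PySem.Dict.empty) := by
  unfold pvB_tables
  rw [pvFoldLoop_eq]
  exact pv_foldl_pair (PySem.List.pyRange 1 m 1)
    (fun d p => d.modify (PySem.List.pyGetD signs (p - 1) 0) [] (fun l => l ++ [p]))
    (fun d p => d.modify (PySem.List.pyGetD signs (p - 1) 0) [] (fun st => PySem.Set.add st p))
    PySem.Dict.empty PySem.Dict.empty

-- pos[s] is exactly the ascending list of positions of sign s
theorem pv_pos_spec (signs : List Int) (m s : Int) :
    ((pvB_tables signs m).1).getD s [] =
      (PySem.List.pyRange 1 m 1).filter (fun p => PySem.List.pyGetD signs (p - 1) 0 == s) := by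
  rw [pvB_tables_eq]
  have h : (PySem.List.pyRange 1 m 1).foldl
      (fun d p => d.modify (PySem.List.pyGetD signs (p - 1) 0) [] (fun l => l ++ [p]))
      PySem.Dict.empty =
      ((PySem.List.pyRange 1 m 1).map
        (fun p => (PySem.List.pyGetD signs (p - 1) 0, p))).foldl
      (fun d q => d.modify q.1 [] (fun l => l ++ [q.2])) PySem.Dict.empty := by
    rw [List.foldl_map]
  rw [h, PySem.Dict.getD_foldl_modify_append]
  simp [List.filter_map, List.map_map, Function.comp_def, PySem.Dict.getD_empty]

theorem pv_members_mem (signs : List Int) (l : List Int)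
    (d : PySem.Dict Int (PySem.Set Int)) (s x : Int) :
    (x ∈ (l.foldl (fun d p =>
        d.modify (PySem.List.pyGetD signs (p - 1) 0) [] (fun st => PySem.Set.add st p)) d).getD s [])
      ↔ x ∈ d.getD s [] ∨ (x ∈ l ∧ PySem.List.pyGetD signs (x - 1) 0 = s) := by
  induction l generalizing d with
  | nil => simp
  | cons a t ih =>
    rw [List.foldl_cons, ih, PySem.Dict.getD_modify]
    by_cases hsa : s = PySem.List.pyGetD signs (a - 1) 0
    · rw [if_pos hsa]
      rw [show d.getD (PySem.List.pyGetD signs (a - 1) 0) [] = d.getD s [] from by rw [hsa]]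
      simp only [PySem.Set.mem_add, List.mem_cons]
      constructor
      · rintro (⟨h | rfl⟩ | ⟨h, hg⟩)
        · exact Or.inl h
        · exact Or.inr ⟨Or.inl rfl, hsa.symm⟩
        · exact Or.inr ⟨Or.inr h, hg⟩
      · rintro (h | ⟨rfl | h, hg⟩)
        · exact Or.inl (Or.inl h)
        · exact Or.inl (Or.inr rfl)
        · exact Or.inr ⟨h, hg⟩
    · rw [if_neg hsa]
      simp only [List.mem_cons]
      constructor
      · rintro (h | ⟨h, hg⟩)
        · exact Or.inl h
        · exact Or.inr ⟨Or.inr h, hg⟩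
      · rintro (h | ⟨rfl | h, hg⟩)
        · exact Or.inl h
        · exact absurd hg.symm hsa
        · exact Or.inr ⟨h, hg⟩

-- members[s] contains exactly the positions 1..m-1 of sign s
theorem pv_members_spec (signs : List Int) (m s x : Int) :
    (x ∈ ((pvB_tables signs m).2).getD s []) ↔
      (1 ≤ x ∧ x < m) ∧ PySem.List.pyGetD signs (x - 1) 0 = s := by
  rw [pvB_tables_eq]
  rw [pv_members_mem]
  simp [PySem.Dict.getD_empty, PySem.List.mem_pyRange_one]

theorem pv_triple_eq (signs : List Int) (m : Int) : pvA_triple signs m = pvB_triple signs m := by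
  unfold pvA_triple pvB_triple
  rw [pvLoop_eq, pvLoop_eq]
  apply pv_findSome?_congr
  intro i hi
  rw [PySem.List.mem_pyRange_one] at hi
  rw [pvLoop_eq]
  set s : Int := PySem.List.pyGetD signs (i - 1) 0 with hs
  set F : Int → Option (List Int) := fun j =>
    if j ≤ m - i - 1 ∧ PySem.List.pyGetD signs (j - 1) 0 = s ∧
        ((1 ≤ m - i - j ∧ m - i - j < m) ∧ PySem.List.pyGetD signs (m - i - j - 1) 0 = s)
    then some [i, j, m - i - j] else none with hF
  have hB : ((pvB_tables signs m).1.getD s []).findSome?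
      (fun j => if j ≤ m - i - 1 ∧
          PySem.Set.contains ((pvB_tables signs m).2.getD s []) (m - i - j) = true
        then some [i, j, m - i - j] else none) = (PySem.List.pyRange 1 m 1).findSome? F := by
    rw [pv_pos_spec, pv_findSome?_filter]
    apply pv_findSome?_congr
    intro j _
    have hmem := pv_members_spec signs m s (m - i - j)
    simp only [hF, beq_iff_eq, PySem.Set.contains_iff]
    by_cases hj : PySem.List.pyGetD signs (j - 1) 0 = s
    · rw [if_pos hj]
      by_cases h1 : j ≤ m - i - 1
      · by_cases hm : m - i - j ∈ (pvB_tables signs m).2.getD s []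
        · rw [if_pos ⟨h1, hm⟩, if_pos ⟨h1, hj, hmem.mp hm⟩]
        · rw [if_neg (fun hc => hm hc.2), if_neg (fun hc => hm (hmem.mpr hc.2.2))]
      · rw [if_neg (fun hc => h1 hc.1), if_neg (fun hc => h1 hc.1)]
    · rw [if_neg hj, if_neg (fun hc => hj hc.2.1)]
  have hA : (PySem.List.pyRange 1 (m - i) 1).findSome? (fun j =>
      if (1 ≤ m - i - j ∧ m - i - j ≤ m - 1) ∧
          s = PySem.List.pyGetD signs (j - 1) 0 ∧
          PySem.List.pyGetD signs (j - 1) 0 = PySem.List.pyGetD signs (m - i - j - 1) 0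
      then some [i, j, m - i - j] else none) = (PySem.List.pyRange 1 m 1).findSome? F := by
    rw [PySem.List.pyRange_one_append 1 (m - i) m (by omega) (by omega)]
    rw [List.findSome?_append]
    have htail : (PySem.List.pyRange (m - i) m 1).findSome? F = none := by
      rw [List.findSome?_eq_none_iff]
      intro j hj
      rw [PySem.List.mem_pyRange_one] at hj
      simp only [hF]
      rw [if_neg]
      rintro ⟨h1, -⟩; omega
    rw [htail]
    have hhead : (PySem.List.pyRange 1 (m - i) 1).findSome? (fun j =>
        if (1 ≤ m - i - j ∧ m - i - j ≤ m - 1) ∧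
            s = PySem.List.pyGetD signs (j - 1) 0 ∧
            PySem.List.pyGetD signs (j - 1) 0 = PySem.List.pyGetD signs (m - i - j - 1) 0
        then some [i, j, m - i - j] else none) = (PySem.List.pyRange 1 (m - i) 1).findSome? F := by
      apply pv_findSome?_congr
      intro j hj
      rw [PySem.List.mem_pyRange_one] at hj
      simp only [hF]
      apply if_congr _ rfl rfl
      constructor
      · rintro ⟨⟨hk1, hk2⟩, hij, hjk⟩
        exact ⟨by omega, hij.symm, ⟨by omega, by rw [← hjk, ← hij]⟩⟩
      · rintro ⟨h1, hjs, ⟨hk1, hk2⟩, hks⟩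
        exact ⟨⟨by omega, by omega⟩, hjs.symm, by rw [hjs, hks]⟩
    rw [hhead]
    cases hfs : (PySem.List.pyRange 1 (m - i) 1).findSome? F <;> simp
  rw [hA, ← hB]

theorem pv_main (signs : List Int) (m : Int) :
    find_decomposition_py signs m = find_decomposition_py_alt signs m := by
  unfold find_decomposition_py find_decomposition_py_alt
  rw [pv_pair_eq, pv_triple_eq]

-- ===== VERDICT (by name: the statement is the Claim_ definition above) =====
theorem find_decomposition_py_spec : Claim_equal_find_decomposition_py := by
  intro signs m _ _
  unfold Spec_find_decomposition_py
  exact pv_main signs m
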